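-- pv_equiv track=rewrite | github.com/MannyIOI/a2sv-camp | October/Week-2/Contest-4/polycarp.py | polycarp
-- ===== SOURCE A (Python) =====
-- def polycarp(input):
--     consecutive_v_count = 0
--     w_count = input.count('w')
--     ans = w_count
--
--     for i in range(len(input)):
--         if input[i] == 'v':
--             consecutive_v_count += 1
--         else:
--             ans += consecutive_v_count // 2
--             consecutive_v_count = 0
--     if consecutive_v_count > 0:
--         ans += consecutive_v_count // 2
--     return ans
-- ===== SOURCE B (Python) =====
-- def polycarp(input):
--     # str.count counts non-overlapping occurrences left to right, so
--     # each maximal run of n 'v's contributes exactly n // 2 'vv' matches.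
--     return input.count('w') + input.count('vv')
-- ===== Notes on version B (the rewrite author's own statement) =====
-- stated objective: simpler
-- what changed: Replaces the per-character loop with its maintained-and-reset consecutive-v counter by a loop-free closed form of two builtin non-overlapping substring counts (count of 'w' plus count of 'vv'), correct because non-overlapping 'vv' matches in a maximal v-run of length n number exactly n // 2.
import Mathlib
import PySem

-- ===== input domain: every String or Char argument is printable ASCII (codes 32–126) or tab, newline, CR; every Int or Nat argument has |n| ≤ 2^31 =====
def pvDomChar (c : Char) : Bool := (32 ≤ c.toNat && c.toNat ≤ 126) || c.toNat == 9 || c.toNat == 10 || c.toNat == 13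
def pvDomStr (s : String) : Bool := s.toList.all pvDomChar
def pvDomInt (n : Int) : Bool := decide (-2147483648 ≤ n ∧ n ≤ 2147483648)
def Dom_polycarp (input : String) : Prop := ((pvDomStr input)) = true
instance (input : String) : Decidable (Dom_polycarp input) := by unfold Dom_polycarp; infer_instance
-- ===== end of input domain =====

-- B replaces A's per-character loop with its maintained consecutive-v counter by a loop-free
-- closed form: input.count('w') + input.count('vv') (non-overlapping substring counts).
-- Same O(n) cost; equivalence proved on all inputs.

-- ===== PORT A =====
-- A's loop body: on 'v' increment the consecutive counter, otherwise flush counter // 2 into ans.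
def pvStepA (p : Int × Int) (c : Char) : Int × Int :=
  if c = 'v' then (p.1 + 1, p.2) else (0, p.2 + PySem.Int.floordiv p.1 2)

-- 'for i in range(len(input)): … input[i] …' visits exactly the characters in order,
-- so it is ported as a fold over input.toList (every index is in range: exact).
def polycarp (input : String) : Int :=
  let wCount : Int := (PySem.Str.count input "w" : Int)
  let st := input.toList.foldl pvStepA (0, wCount)
  if st.1 > 0 then st.2 + PySem.Int.floordiv st.1 2 else st.2

-- ===== PORT B =====
def polycarp_alt (input : String) : Int :=
  (PySem.Str.count input "w" : Int) + (PySem.Str.count input "vv" : Int)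

-- ===== PRECONDITION & SPEC =====
def Spec_polycarp (input : String) (out : Int) : Prop := out = polycarp_alt input
instance (input : String) (out : Int) : Decidable (Spec_polycarp input out) := by unfold Spec_polycarp; infer_instance

-- ===== CLAIM (what is proved, stated in full; the proofs are below) =====
def Claim_equal_polycarp : Prop := ∀ (input : String), Dom_polycarp input → Spec_polycarp input (polycarp input)

-- ===== LEMMAS AND PROOFS =====

-- // 2 is Lean's ediv for the positive divisor 2
theorem pvFd2 (a : Int) : PySem.Int.floordiv a 2 = a / 2 := by
  simp [PySem.Int.floordiv, Int.fdiv_eq_ediv]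

-- A's loop keeps 'ans' purely additive: fold from (cnt, a) = fold from (cnt, 0) shifted by a.
theorem pvFoldA_add (l : List Char) (cnt a : Int) :
    l.foldl pvStepA (cnt, a) = ((l.foldl pvStepA (cnt, 0)).1, a + (l.foldl pvStepA (cnt, 0)).2) := by
  induction l generalizing cnt a with
  | nil => simp
  | cons c t ih =>
    simp only [List.foldl_cons, pvStepA]
    by_cases hc : c = 'v'
    · rw [if_pos hc, if_pos hc, ih (cnt + 1) a, ih (cnt + 1) 0]
      try simp [Prod.ext_iff]
      try ring
    · rw [if_neg hc, if_neg hc, ih 0 (a + PySem.Int.floordiv cnt 2),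
        ih 0 (0 + PySem.Int.floordiv cnt 2)]
      try simp [Prod.ext_iff]
      try ring

-- A's finishing step ('if consecutive_v_count > 0: ans += …')
def pvFinish (p : Int × Int) : Int :=
  if p.1 > 0 then p.2 + PySem.Int.floordiv p.1 2 else p.2

theorem pvFinish_add (x a s : Int) : pvFinish (x, a + s) = a + pvFinish (x, s) := by
  unfold pvFinish; split <;> ring

-- Non-overlapping left-to-right 'vv' matching as a two-state automaton
-- (pending = an unpaired 'v' is currently open).
def pvF (pending : Bool) : List Char → Nat
  | [] => 0
  | c :: t =>
    if c = 'v' then (if pending then 1 + pvF false t else pvF true t)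
    else pvF false t

-- str.count's worker for the pattern "vv" computes exactly the automaton count
theorem pvCountGo_vv (fuel : Nat) (l : List Char) (acc : Nat) (hf : l.length ≤ fuel) :
    PySem.Chars.count.go ['v', 'v'] fuel l acc = acc + pvF false l := by
  induction fuel generalizing l acc with
  | zero =>
    have : l = [] := List.eq_nil_of_length_eq_zero (Nat.le_zero.mp hf)
    subst this; simp [PySem.Chars.count.go, pvF]
  | succ f ih =>
    cases l with
    | nil => simp [PySem.Chars.count.go, pvF]
    | cons c t =>
      cases t with
      | nil =>
        have hp : List.isPrefixOf ['v', 'v'] [c] = false := by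
          simp [List.isPrefixOf]
        simp only [PySem.Chars.count.go, hp, Bool.false_eq_true, if_false]
        rw [ih [] acc (by simp)]
        simp only [pvF]
        split <;> rfl
      | cons d t' =>
        by_cases hc : c = 'v'
        · subst hc
          by_cases hd : d = 'v'
          · subst hd
            have hp : List.isPrefixOf ['v', 'v'] ('v' :: 'v' :: t') = true := by
              simp [List.isPrefixOf]
            simp only [PySem.Chars.count.go, hp, if_true]
            have hdrop : List.drop (['v', 'v'].length) ('v' :: 'v' :: t') = t' := rfl
            rw [hdrop, ih t' (acc + 1) (by simp at hf ⊢; omega)]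
            have hv : pvF false ('v' :: 'v' :: t') = 1 + pvF false t' := by
              simp [pvF]
            rw [hv]
            omega
          · have hp : List.isPrefixOf ['v', 'v'] ('v' :: d :: t') = false := by
              simp only [List.isPrefixOf, Bool.and_eq_false_iff, beq_eq_false_iff_ne, ne_eq]
              exact Or.inr (Or.inl fun h => hd h.symm)
            simp only [PySem.Chars.count.go, hp, Bool.false_eq_true, if_false]
            rw [ih (d :: t') acc (by simp at hf ⊢; omega)]
            congr 1
            simp [pvF, hd]
        · have hp : List.isPrefixOf ['v', 'v'] (c :: d :: t') = false := by
            simp only [List.isPrefixOf, Bool.and_eq_false_iff, beq_eq_false_iff_ne, ne_eq]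
            exact Or.inl fun h => hc h.symm
          simp only [PySem.Chars.count.go, hp, Bool.false_eq_true, if_false]
          rw [ih (d :: t') acc (by simp at hf ⊢; omega)]
          congr 1
          simp [pvF, hc]

-- main invariant: A's flushed loop equals the automaton count with pending = parity of cnt
theorem pvMainA (l : List Char) (cnt : Int) (hc : 0 ≤ cnt) :
    pvFinish (l.foldl pvStepA (cnt, 0))
      = PySem.Int.floordiv cnt 2 + (pvF (decide (cnt % 2 = 1)) l : Int) := by
  induction l generalizing cnt with
  | nil =>
    simp only [List.foldl_nil, pvFinish, pvF, pvFd2]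
    split <;> omega
  | cons c t ih =>
    by_cases hcv : c = 'v'
    · subst hcv
      rw [List.foldl_cons]
      have hs : pvStepA (cnt, 0) 'v' = (cnt + 1, 0) := by simp [pvStepA]
      rw [hs, ih (cnt + 1) (by omega)]
      simp only [pvFd2]
      by_cases hpar : cnt % 2 = 1
      · have hb1 : (decide (cnt % 2 = 1)) = true := by simp [hpar]
        have hb2 : (decide ((cnt + 1) % 2 = 1)) = false := by simp; omega
        rw [hb1, hb2]
        have hv : pvF true ('v' :: t) = 1 + pvF false t := by simp [pvF]
        rw [hv]
        push_cast
        omega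
      · have hb1 : (decide (cnt % 2 = 1)) = false := by simp [hpar]
        have hb2 : (decide ((cnt + 1) % 2 = 1)) = true := by simp; omega
        rw [hb1, hb2]
        have hv : pvF false ('v' :: t) = pvF true t := by simp [pvF]
        rw [hv]
        omega
    · rw [List.foldl_cons]
      have hs : pvStepA (cnt, 0) c = (0, 0 + PySem.Int.floordiv cnt 2) := by
        simp [pvStepA, hcv]
      rw [hs, pvFoldA_add, pvFinish_add, ih 0 (le_refl 0)]
      have hb : (decide ((0 : Int) % 2 = 1)) = false := by decide
      rw [hb]
      have hv : ∀ b, pvF b (c :: t) = pvF false t := fun b => by simp [pvF, hcv]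
      rw [hv]
      simp only [pvFd2]
      ring

-- ===== VERDICT (by name: the statement is the Claim_ definition above) =====
theorem polycarp_spec : Claim_equal_polycarp := by
  intro input _
  unfold Spec_polycarp polycarp polycarp_alt
  simp only [PySem.Str.count_eq]
  rw [pvFoldA_add]
  show pvFinish (_, (_ : Int) + _) = _
  rw [pvFinish_add, pvMainA input.toList 0 (le_refl 0)]
  have hvv : PySem.Chars.count input.toList "vv".toList
      = PySem.Chars.count.go ['v', 'v'] input.toList.length input.toList 0 := rfl
  rw [hvv, pvCountGo_vv input.toList.length input.toList 0 (le_refl _)]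
  simp [PySem.Int.floordiv]
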